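-- pv_equiv track=rewrite | github.com/CDonosoK/UTFSM | Lenguajes de Programación - INF253/Proyecto Final/Generador.py | CrearSudoInicial
-- ===== SOURCE A (Python) =====
-- import math
--
-- def CrearSudoInicial(n):
-- 	sudo=[]
-- 	raiz=int(math.sqrt(n))
-- 	for x in range(1,raiz+1):
-- 		l=[x]
-- 		for aux in range(x+1,x+n):
-- 			if(aux!=n):
-- 				l.append(aux%n)
-- 			else:
-- 				l.append(n)
-- 		sudo.append(l.copy())
--
-- 		for y in range(raiz-1):
-- 			pos=(x-1)*raiz
-- 			l=((sudo[pos+y]).copy())[raiz:n] + ((sudo[pos+y]).copy())[:raiz]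
--
-- 			sudo.append(l)
--
-- 	return sudo
-- ===== SOURCE B (Python) =====
-- import math
--
-- def CrearSudoInicial(n):
--     raiz = int(math.sqrt(n))
--     base = list(range(1, n + 1)) * 2
--     filas = []
--     for r in range(raiz * raiz):
--         s = (r // raiz + r % raiz * raiz) % n
--         filas.append(base[s:s + n])
--     return filas
-- ===== Notes on version B (the rewrite author's own statement) =====
-- stated objective: alternative
-- what changed: B computes each row's rotation offset in closed form from its row index and slices the row out of one precomputed doubled base list, instead of A's building each band's base row element by element and deriving every further row by slicing and re-concatenating the previous row.
import Mathlib
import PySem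

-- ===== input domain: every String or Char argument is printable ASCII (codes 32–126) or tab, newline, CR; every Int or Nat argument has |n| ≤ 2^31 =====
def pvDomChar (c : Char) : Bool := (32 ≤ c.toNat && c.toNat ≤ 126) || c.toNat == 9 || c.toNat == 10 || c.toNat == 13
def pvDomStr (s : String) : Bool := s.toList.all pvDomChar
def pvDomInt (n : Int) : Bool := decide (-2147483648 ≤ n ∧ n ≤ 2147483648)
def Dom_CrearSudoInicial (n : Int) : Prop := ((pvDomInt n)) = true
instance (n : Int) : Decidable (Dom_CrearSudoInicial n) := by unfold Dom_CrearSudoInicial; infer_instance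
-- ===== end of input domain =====

-- B computes each row's rotation offset in closed form and slices it out of one precomputed doubled base list,
-- instead of A's building base rows element by element and chaining rotations row to row.

-- ===== PORT A =====
-- raiz = int(math.sqrt(n)): equals isqrt(n) for every 0 ≤ n ≤ 2^31 (double sqrt is exact enough there);
-- n < 0 raises ValueError in Python — excluded by Pre_.
def pySqrtInt (n : Int) : Int := (Nat.sqrt n.toNat : Int)

def CrearSudoInicial (n : Int) : List (List Int) :=
  let raiz := pySqrtInt n
  (PySem.List.pyRange 1 (raiz + 1) 1).foldl
    (fun sgrid x =>
      let l : List Int :=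
        x :: (PySem.List.pyRange (x + 1) (x + n) 1).map
          (fun aux => if aux ≠ n then PySem.Int.mod aux n else n)
      let sgrid := sgrid ++ [l]
      (PySem.List.pyRange 0 (raiz - 1) 1).foldl
        (fun sgrid y =>
          let pos := (x - 1) * raiz
          -- sgrid[pos+y]: always in range on Pre_ (ported with a default)
          let prev := PySem.List.pyGetD sgrid (pos + y) []
          sgrid ++ [PySem.List.slice prev (some raiz) (some n) ++
                   PySem.List.slice prev (some 0) (some raiz)])
        sgrid)
    []

-- ===== PORT B =====
def CrearSudoInicial_alt (n : Int) : List (List Int) :=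
  let raiz := pySqrtInt n
  -- base = list(range(1, n+1)) * 2
  let base := PySem.List.pyRange 1 (n + 1) 1 ++ PySem.List.pyRange 1 (n + 1) 1
  (PySem.List.pyRange 0 (raiz * raiz) 1).foldl
    (fun filas r =>
      let s := PySem.Int.mod (PySem.Int.floordiv r raiz + PySem.Int.mod r raiz * raiz) n
      filas ++ [PySem.List.slice base (some s) (some (s + n))])
    []

-- ===== PRECONDITION & SPEC =====
-- Pre_ excludes exactly n < 0, where math.sqrt raises ValueError (in A and in B alike).
def Pre_CrearSudoInicial (n : Int) : Prop := 0 ≤ n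
instance (n : Int) : Decidable (Pre_CrearSudoInicial n) := by unfold Pre_CrearSudoInicial; infer_instance
def pvWitness_CrearSudoInicial : Int := (9)

def Spec_CrearSudoInicial (n : Int) (out : List (List Int)) : Prop := out = CrearSudoInicial_alt n
instance (n : Int) (out : List (List Int)) : Decidable (Spec_CrearSudoInicial n out) := by unfold Spec_CrearSudoInicial; infer_instance

-- ===== CLAIM (what is proved, stated in full; the proofs are below) =====
def Claim_equal_CrearSudoInicial : Prop := ∀ (n : Int), Dom_CrearSudoInicial n → Pre_CrearSudoInicial n → Spec_CrearSudoInicial n (CrearSudoInicial n)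

-- ===== LEMMAS AND PROOFS =====
def gRow (n s : Int) : List Int :=
  (PySem.List.pyRange 0 n 1).map (fun c => PySem.Int.mod (s + c) n + 1)
lemma mod_small_double (a n : Int) (hn : 0 < n) (h0 : 0 ≤ a) (h2 : a < 2 * n) :
    PySem.Int.mod a n = if a < n then a else a - n := by
  rw [PySem.Int.mod_eq_emod_of_pos hn]
  split_ifs with h
  · exact Int.emod_eq_of_lt h0 h
  · rw [← Int.sub_emod_right a n]; exact Int.emod_eq_of_lt (by omega) (by omega)

lemma base_row_eq (n x : Int) (hn : 1 ≤ n) (h1 : 1 ≤ x) (hx : x ≤ n) :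
    x :: (PySem.List.pyRange (x + 1) (x + n) 1).map
      (fun aux => if aux ≠ n then PySem.Int.mod aux n else n) = gRow n (x - 1) := by
  apply List.ext_getElem
  · simp [gRow, PySem.List.length_pyRange_one]; omega
  · intro k h1' h2'
    simp only [gRow, List.getElem_map, PySem.List.getElem_pyRange_one]
    match k with
    | 0 =>
      simp only [List.getElem_cons_zero]
      rw [mod_small_double _ _ (by omega) (by omega) (by omega)]
      simp; omega
    | k + 1 =>
      simp only [List.getElem_cons_succ, List.getElem_map, PySem.List.getElem_pyRange_one]
      have hk : (k : Int) < n - 1 := by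
        have := h1'; simp [PySem.List.length_pyRange_one] at this; omega
      rw [mod_small_double ((x - 1) + (0 + (k+1 : Nat))) _ (by push_cast; omega) (by omega) (by push_cast; omega)]
      by_cases hd : x + 1 + (k : Int) = n
      · rw [if_neg (by simp [hd])]
        split_ifs <;> omega
      · rw [if_pos hd]
        rw [mod_small_double _ _ (by omega) (by omega) (by push_cast; omega)]
        split_ifs <;> push_cast <;> omega

lemma mod_add_self (a n : Int) (hn : 0 < n) :
    PySem.Int.mod (a + n) n = PySem.Int.mod a n := by
  rw [PySem.Int.mod_eq_emod_of_pos hn, PySem.Int.mod_eq_emod_of_pos hn, Int.add_emod_right]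

lemma length_gRow (n s : Int) : (gRow n s).length = n.toNat := by
  simp [gRow, PySem.List.length_pyRange_one]

lemma getElem_gRow (n s : Int) (k : Nat) (hk : k < n.toNat) :
    (gRow n s)[k]'(by rw [length_gRow]; exact hk) = PySem.Int.mod (s + k) n + 1 := by
  simp [gRow, PySem.List.getElem_pyRange_one]

lemma rot_row_eq (n R s : Int) (hn : 0 < n) (h0 : 0 ≤ R) (hR : R ≤ n) :
    PySem.List.slice (gRow n s) (some R) (some n) ++
      PySem.List.slice (gRow n s) (some 0) (some R) = gRow n (s + R) := by
  have hx : ∀ (xs : List Int), PySem.List.slice xs (some R) (some n)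
      = (xs.drop R.toNat).take (n.toNat - R.toNat) := by
    intro xs
    rw [show R = ((R.toNat : Nat) : Int) from by omega,
        show n = ((n.toNat : Nat) : Int) from by omega, PySem.List.slice_natCast]
    simp only [Int.toNat_natCast]
  have hx0 : ∀ (xs : List Int), PySem.List.slice xs (some 0) (some R)
      = (xs.drop 0).take (R.toNat - 0) := by
    intro xs
    rw [show (0 : Int) = ((0 : Nat) : Int) from rfl,
        show R = ((R.toNat : Nat) : Int) from by omega, PySem.List.slice_natCast]
    simp only [Int.toNat_natCast]
  rw [hx, hx0]
  apply List.ext_getElem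
  · simp [length_gRow]; omega
  · intro k hk1 hk2
    rw [length_gRow] at hk2
    by_cases hcase : k < n.toNat - R.toNat
    · rw [List.getElem_append_left (by simp [length_gRow]; omega)]
      rw [List.getElem_take, List.getElem_drop]
      rw [getElem_gRow n s _ (by omega), getElem_gRow n _ k hk2]
      rw [show ((R.toNat + k : Nat) : Int) = R + (k : Int) from by push_cast; omega]
      ring_nf
    · rw [List.getElem_append_right (by simp [length_gRow]; omega)]
      simp only [List.getElem_take, List.drop_zero, List.length_take, List.length_drop,
        length_gRow]
      rw [getElem_gRow n s _ (by omega), getElem_gRow n _ k hk2]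
      rw [show s + R + (k : Int) = (s + ((k - (n.toNat - R.toNat) : Nat) : Int)) + n from by push_cast; omega]
      rw [mod_add_self _ _ hn]
      simp

lemma inner_loop (n R : Int) (x : Int) (sgrid : List (List Int))
    (hn : 1 ≤ n) (hR : R ≤ n)
    (hlen : (sgrid.length : Int) = (x - 1) * R)
    (j : Nat) (hj : (j : Int) ≤ R - 1) :
    (PySem.List.pyRange 0 (j : Int) 1).foldl
      (fun sgrid y =>
        let pos := (x - 1) * R
        let prev := PySem.List.pyGetD sgrid (pos + y) []
        sgrid ++ [PySem.List.slice prev (some R) (some n) ++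
                 PySem.List.slice prev (some 0) (some R)])
      (sgrid ++ [gRow n (x - 1)])
    = sgrid ++ (List.range (j + 1)).map
        (fun (y : Nat) => gRow n ((x - 1) + (y : Int) * R)) := by
  induction j with
  | zero => simp [PySem.List.pyRange_one_eq_nil]
  | succ j ih =>
    have hj' : (j : Int) ≤ R - 1 := by push_cast at hj ⊢; omega
    rw [show ((j + 1 : Nat) : Int) = (j : Int) + 1 from by push_cast; ring]
    rw [PySem.List.pyRange_one_succ_right (by positivity), List.foldl_append]
    rw [ih hj']
    simp only [List.foldl_cons, List.foldl_nil]
    have hidx : (x - 1) * R + (j : Int) = ((sgrid.length + j : Nat) : Int) := by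
      push_cast; omega
    rw [hidx, PySem.List.pyGetD_natCast]
    have hget : (sgrid ++ (List.range (j + 1)).map
        (fun (y : Nat) => gRow n ((x - 1) + (y : Int) * R))).getD (sgrid.length + j) []
        = gRow n ((x - 1) + (j : Int) * R) := by
      rw [List.getD_eq_getElem?_getD, List.getElem?_append_right (by omega)]
      simp only [Nat.add_sub_cancel_left]
      rw [List.getElem?_map, List.getElem?_range (by omega)]
      rfl
    rw [hget]
    rw [rot_row_eq n R _ (by omega) (by omega) hR]
    rw [List.range_succ (n := j + 1), List.map_append, ← List.append_assoc]
    congr 1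
    simp only [List.map_cons, List.map_nil]
    congr 2
    push_cast; ring

def bandL (n R : Int) (m : Nat) : List (List Int) :=
  (List.range R.toNat).map (fun (y : Nat) => gRow n ((m : Int) + (y : Int) * R))

def rowsL (n R : Int) (m : Nat) : List (List Int) :=
  (List.range m).flatMap (fun i => bandL n R i)

lemma rowsL_succ (n R : Int) (m : Nat) :
    rowsL n R (m + 1) = rowsL n R m ++ bandL n R m := by
  simp [rowsL, List.range_succ]

lemma length_bandL (n R : Int) (m : Nat) : (bandL n R m).length = R.toNat := by
  simp [bandL]

lemma length_rowsL (n R : Int) (m : Nat) : (rowsL n R m).length = m * R.toNat := by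
  induction m with
  | zero => simp [rowsL]
  | succ m ih => rw [rowsL_succ]; simp [ih, length_bandL]; ring

lemma outer_loop (n R : Int) (hn : 1 ≤ n) (hR1 : 1 ≤ R) (hR : R ≤ n) (m : Nat)
    (hm : (m : Int) ≤ R) :
    (PySem.List.pyRange 1 ((m : Int) + 1) 1).foldl
      (fun sgrid x =>
        let l : List Int :=
          x :: (PySem.List.pyRange (x + 1) (x + n) 1).map
            (fun aux => if aux ≠ n then PySem.Int.mod aux n else n)
        let sgrid := sgrid ++ [l]
        (PySem.List.pyRange 0 (R - 1) 1).foldl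
          (fun sgrid y =>
            let pos := (x - 1) * R
            let prev := PySem.List.pyGetD sgrid (pos + y) []
            sgrid ++ [PySem.List.slice prev (some R) (some n) ++
                     PySem.List.slice prev (some 0) (some R)])
          sgrid)
      []
    = rowsL n R m := by
  induction m with
  | zero => simp [PySem.List.pyRange_one_eq_nil, rowsL]
  | succ m ih =>
    have hm' : (m : Int) ≤ R := by push_cast at hm; omega
    rw [show ((m + 1 : Nat) : Int) + 1 = ((m : Int) + 1) + 1 from by push_cast; ring]
    rw [PySem.List.pyRange_one_succ_right (by omega), List.foldl_append]
    rw [ih hm']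
    simp only [List.foldl_cons, List.foldl_nil]
    rw [base_row_eq n ((m : Int) + 1) hn (by omega) (by omega)]
    rw [show R - 1 = (((R - 1).toNat : Nat) : Int) from by omega]
    rw [inner_loop n R ((m : Int) + 1) (rowsL n R m) hn hR
      (by rw [length_rowsL]; push_cast [Int.toNat_of_nonneg (show (0:Int) ≤ R by omega)]; ring) ((R - 1).toNat) (by omega)]
    rw [rowsL_succ]
    congr 1
    rw [show (R - 1).toNat + 1 = R.toNat from by omega]
    unfold bandL
    apply List.map_congr_left
    intro y hy
    congr 1
    ring

lemma gRow_mod (n s : Int) (hn : 0 < n) :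
    gRow n (PySem.Int.mod s n) = gRow n s := by
  unfold gRow
  apply List.map_congr_left
  intro c _
  congr 1
  rw [PySem.Int.mod_eq_emod_of_pos hn, PySem.Int.mod_eq_emod_of_pos hn,
    PySem.Int.mod_eq_emod_of_pos hn, Int.emod_add_emod]

lemma slice_doubled (n s : Int) (hn : 0 < n) (h0 : 0 ≤ s) (hsn : s < n) :
    PySem.List.slice (PySem.List.pyRange 1 (n + 1) 1 ++ PySem.List.pyRange 1 (n + 1) 1)
      (some s) (some (s + n)) = gRow n s := by
  have hx : ∀ (xs : List Int), PySem.List.slice xs (some s) (some (s + n))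
      = (xs.drop s.toNat).take ((s.toNat + n.toNat) - s.toNat) := by
    intro xs
    rw [show s = ((s.toNat : Nat) : Int) from by omega,
        show ((s.toNat : Nat) : Int) + n = ((s.toNat + n.toNat : Nat) : Int) from by push_cast; omega,
        PySem.List.slice_natCast]
    simp only [Int.toNat_natCast]
  rw [hx]
  apply List.ext_getElem
  · simp [length_gRow, PySem.List.length_pyRange_one]; omega
  · intro k hk1 hk2
    rw [length_gRow] at hk2
    rw [List.getElem_take, List.getElem_drop, getElem_gRow n s k hk2]
    rw [mod_small_double _ _ hn (by omega) (by push_cast; omega)]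
    by_cases hcase : s.toNat + k < n.toNat
    · rw [List.getElem_append_left (by simp [PySem.List.length_pyRange_one]; omega)]
      rw [PySem.List.getElem_pyRange_one]
      split_ifs <;> push_cast <;> omega
    · rw [List.getElem_append_right (by simp [PySem.List.length_pyRange_one]; omega)]
      simp only [PySem.List.length_pyRange_one]
      rw [PySem.List.getElem_pyRange_one]
      split_ifs <;> push_cast <;> omega

lemma alt_eq_rowsL (n R : Int) (hn : 1 ≤ n) (hR0 : 0 < R) (m : Nat) :
    (PySem.List.pyRange 0 ((m : Int) * R) 1).foldl
      (fun filas r =>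
        let s := PySem.Int.mod (PySem.Int.floordiv r R + PySem.Int.mod r R * R) n
        filas ++ [PySem.List.slice
          (PySem.List.pyRange 1 (n + 1) 1 ++ PySem.List.pyRange 1 (n + 1) 1)
          (some s) (some (s + n))])
      []
    = rowsL n R m := by
  rw [PySem.List.foldl_append_singleton_eq_map, List.nil_append]
  induction m with
  | zero => simp [PySem.List.pyRange_one_eq_nil, rowsL]
  | succ m ih =>
    rw [show ((m + 1 : Nat) : Int) * R = (m : Int) * R + R from by push_cast; ring]
    rw [PySem.List.pyRange_one_append 0 ((m : Int) * R) ((m : Int) * R + R)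
      (by positivity) (by omega), List.map_append, ih, rowsL_succ]
    congr 1
    rw [PySem.List.pyRange_one ((m : Int) * R) ((m : Int) * R + R)]
    rw [show ((m : Int) * R + R - (m : Int) * R).toNat = R.toNat from by
      congr 1; ring]
    rw [List.map_map]
    unfold bandL
    apply List.map_congr_left
    intro k hk
    simp only [Function.comp_apply]
    have hkR : (k : Int) < R := by
      rw [List.mem_range] at hk; omega
    have hfd : PySem.Int.floordiv ((m : Int) * R + (k : Int)) R = (m : Int) := by
      rw [PySem.Int.floordiv_eq_iff_of_pos hR0]
      constructor
      · have : (0 : Int) ≤ (k : Int) := Int.natCast_nonneg k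
        linarith
      · nlinarith [hkR]
    have hmod : PySem.Int.mod ((m : Int) * R + (k : Int)) R = (k : Int) := by
      have h := PySem.Int.floordiv_mul_add_mod ((m : Int) * R + (k : Int)) R
      rw [hfd] at h; linarith
    show PySem.List.slice _ _ _ = _
    rw [hfd, hmod]
    rw [slice_doubled n _ (by omega) (PySem.Int.mod_nonneg _ (by omega))
      (PySem.Int.mod_lt _ (by omega))]
    exact gRow_mod n _ (by omega)

-- ===== VERDICT (by name: the statement is the Claim_ definition above) =====
theorem CrearSudoInicial_spec : Claim_equal_CrearSudoInicial := by
  intro n hdom hpre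
  unfold Spec_CrearSudoInicial
  have hpre' : 0 ≤ n := hpre
  by_cases h0 : n = 0
  · subst h0; rfl
  · have hn : 1 ≤ n := by omega
    have hm1 : 1 ≤ Nat.sqrt n.toNat := by
      have : 0 < n.toNat := by omega
      have := Nat.sqrt_pos.mpr this
      omega
    have hRn : ((Nat.sqrt n.toNat : Nat) : Int) ≤ n := by
      have h1 := Nat.sqrt_le_self n.toNat
      omega
    have hA : CrearSudoInicial n = rowsL n ((Nat.sqrt n.toNat : Nat) : Int) (Nat.sqrt n.toNat) := by
      unfold CrearSudoInicial pySqrtInt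
      exact outer_loop n ((Nat.sqrt n.toNat : Nat) : Int) hn (by exact_mod_cast hm1) hRn
        (Nat.sqrt n.toNat) le_rfl
    have hB : CrearSudoInicial_alt n = rowsL n ((Nat.sqrt n.toNat : Nat) : Int) (Nat.sqrt n.toNat) := by
      unfold CrearSudoInicial_alt pySqrtInt
      exact alt_eq_rowsL n ((Nat.sqrt n.toNat : Nat) : Int) hn (by exact_mod_cast hm1)
        (Nat.sqrt n.toNat)
    rw [hA, hB]
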